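-- pv_equiv track=rewrite | github.com/udapaana/data | tools/pipeline/utils/slp1_extended.py | convert_to_display_format
-- ===== SOURCE A (Python) =====
-- def convert_to_display_format(text: str, target_format: str = 'unicode') -> str:
--     """
--     Convert SLP1-Extended to display format with proper accent marks.
--     """
--     if target_format == 'unicode':
--         # Map to Unicode combining marks
--         unicode_map = {
--             '{U}': '\u0951',    # Vedic udatta
--             '{A}': '\u0952',    # Vedic anudatta
--             '{S}': '\u0951',    # Svarita (same as udatta in many fonts)
--             '{DS}': '\u0951\u0951',  # Double udatta for dheerga
--             '{AV}': '\u093D',   # Avagraha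
--             '{GM}': 'ṅ',        # IAST guttural nasal
--             '{GG}': 'ṅ',
--             '{NN}': 'ñ',        # IAST palatal nasal
--             '{NM}': 'ṁ',        # IAST anusvara
--             '{NJ}': 'ñ',
--             '{NG}': 'ṅ',
--             '{CS}': '·',        # Middle dot for compound separator
--             '{1BAR}': '|',
--             '{2BAR}': '||',
--             '{3BAR}': '|||'
--         }
--
--         for marker, unicode_char in unicode_map.items():
--             text = text.replace(marker, unicode_char)
--
--     return text
-- ===== SOURCE B (Python) =====
-- _CONTENT_MAP = {
--     'U': '\u0951',
--     'A': '\u0952',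
--     'S': '\u0951',
--     'DS': '\u0951\u0951',
--     'AV': '\u093D',
--     'GM': 'ṅ',
--     'GG': 'ṅ',
--     'NN': 'ñ',
--     'NM': 'ṁ',
--     'NJ': 'ñ',
--     'NG': 'ṅ',
--     'CS': '·',
--     '1BAR': '|',
--     '2BAR': '||',
--     '3BAR': '|||',
-- }
--
--
-- def convert_to_display_format(text: str, target_format: str = 'unicode') -> str:
--     """One scan: at each '{' read up to the next '}' and look the content up,
--     instead of fifteen sequential full-text replace passes."""
--     if target_format != 'unicode':
--         return text
--     out = []
--     i = 0
--     n = len(text)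
--     while i < n:
--         c = text[i]
--         if c == '{':
--             j = text.find('}', i + 1)
--             if j != -1 and text[i + 1:j] in _CONTENT_MAP:
--                 out.append(_CONTENT_MAP[text[i + 1:j]])
--                 i = j + 1
--                 continue
--         out.append(c)
--         i += 1
--     return ''.join(out)
-- ===== Notes on version B (the rewrite author's own statement) =====
-- stated objective: alternative
-- what changed: Replaces the fifteen sequential full-text replace passes with a single scan that, at each opening brace, reads the content up to the next closing brace and looks it up in a dict keyed by the bare marker content.
import Mathlib
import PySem

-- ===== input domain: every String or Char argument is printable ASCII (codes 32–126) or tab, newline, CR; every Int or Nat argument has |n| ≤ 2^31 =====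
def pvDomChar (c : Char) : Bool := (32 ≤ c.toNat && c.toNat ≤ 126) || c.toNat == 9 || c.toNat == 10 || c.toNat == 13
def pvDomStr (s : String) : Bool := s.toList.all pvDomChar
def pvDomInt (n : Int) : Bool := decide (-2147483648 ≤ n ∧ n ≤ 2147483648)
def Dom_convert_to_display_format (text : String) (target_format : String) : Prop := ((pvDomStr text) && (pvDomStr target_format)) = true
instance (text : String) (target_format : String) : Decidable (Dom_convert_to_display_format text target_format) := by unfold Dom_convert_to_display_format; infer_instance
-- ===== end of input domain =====

-- B replaces A's fifteen sequential full-text replace passes by a single scan that,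
-- at each opening brace, reads the content up to the next closing brace and looks it
-- up in a dict keyed by the bare marker content (alternative decomposition, same result).
-- ===== PORT A =====
def pvUnicodeMap : List (String × String) :=
  [("{U}", "\u0951"), ("{A}", "\u0952"), ("{S}", "\u0951"), ("{DS}", "\u0951\u0951"),
   ("{AV}", "\u093D"), ("{GM}", "ṅ"), ("{GG}", "ṅ"), ("{NN}", "ñ"), ("{NM}", "ṁ"),
   ("{NJ}", "ñ"), ("{NG}", "ṅ"), ("{CS}", "·"), ("{1BAR}", "|"), ("{2BAR}", "||"),
   ("{3BAR}", "|||")]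

def convert_to_display_format (text : String) (target_format : String) : String :=
  if target_format == "unicode" then
    pvUnicodeMap.foldl (fun t p => PySem.Str.replace t p.1 p.2) text
  else
    text

-- ===== PORT B =====
-- Source B's _CONTENT_MAP: marker content (without braces) → replacement
def pvContentPairs : List (String × String) :=
  [("U", "\u0951"), ("A", "\u0952"), ("S", "\u0951"), ("DS", "\u0951\u0951"),
   ("AV", "\u093D"), ("GM", "ṅ"), ("GG", "ṅ"), ("NN", "ñ"), ("NM", "ṁ"),
   ("NJ", "ñ"), ("NG", "ṅ"), ("CS", "·"), ("1BAR", "|"), ("2BAR", "||"),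
   ("3BAR", "|||")]

def pvContentDict : PySem.Dict String String := PySem.Dict.ofList pvContentPairs

-- Source B's while loop over positions, as recursion on the remaining characters;
-- text.find of the closing brace from i + 1 becomes Chars.find on the tail after the current char
def pvScanB : List Char → List Char
  | [] => []
  | c :: t =>
    if c = '{' then
      let j := PySem.Chars.find t ['}']
      if j = -1 then c :: pvScanB t
      else
        match pvContentDict.get? (String.ofList (t.take j.toNat)) with
        | some v => v.toList ++ pvScanB (t.drop (j.toNat + 1))
        | none => c :: pvScanB t
    else c :: pvScanB t
termination_by s => s.length
decreasing_by
  · simp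
  · simp only [List.length_drop, List.length_cons]; omega
  · simp
  · simp

def convert_to_display_format_alt (text : String) (target_format : String) : String :=
  if target_format == "unicode" then String.ofList (pvScanB text.toList) else text

-- ===== PRECONDITION & SPEC =====
def Spec_convert_to_display_format (text : String) (target_format : String) (out : String) : Prop := out = convert_to_display_format_alt text target_format
instance (text : String) (target_format : String) (out : String) : Decidable (Spec_convert_to_display_format text target_format out) := by unfold Spec_convert_to_display_format; infer_instance

-- ===== CLAIM (what is proved, stated in full; the proofs are below) =====
def Claim_equal_convert_to_display_format : Prop := ∀ (text : String) (target_format : String), Dom_convert_to_display_format text target_format → Spec_convert_to_display_format text target_format (convert_to_display_format text target_format)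

-- ===== LEMMAS AND PROOFS =====

-- A's marker table on the character-list level (proof-side only)
def pvMarkers : List (List Char × List Char) :=
  pvUnicodeMap.map (fun p => (p.1.toList, p.2.toList))

-- intermediate single-pass scan driven by "which marker is a prefix here"
def pvScan : List Char → List Char
  | [] => []
  | c :: t =>
    match pvMarkers.find? (fun p => p.1.isPrefixOf (c :: t)) with
    | some p => p.2 ++ pvScan (t.drop (p.1.length - 1))
    | none => c :: pvScan t
termination_by s => s.length
decreasing_by
  · simp only [List.length_drop, List.length_cons]
    omega
  · simp

-- the characters that occur in the markers; no replacement string contains any of them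
def pvMC : List Char := ['{', '}', 'U', 'A', 'S', 'D', 'V', 'G', 'M', 'N', 'J', 'C', 'B', 'R', '1', '2', '3']

set_option maxRecDepth 4096 in
lemma pvM_head : ∀ q ∈ pvMarkers, q.1.head? = some '{' := by decide
set_option maxRecDepth 4096 in
lemma pvM_tail_no_brace : ∀ q ∈ pvMarkers, '{' ∉ q.1.tail := by decide
set_option maxRecDepth 4096 in
lemma pvM_fst_mc : ∀ q ∈ pvMarkers, ∀ c ∈ q.1, c ∈ pvMC := by
  have h : pvMarkers.all (fun q => q.1.all (fun c => pvMC.contains c)) = true := by decide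
  intro q hq c hc
  simp only [List.all_eq_true] at h
  simpa using h q hq c hc
set_option maxRecDepth 4096 in
lemma pvM_snd_not_mc : ∀ q ∈ pvMarkers, ∀ c ∈ q.2, c ∉ pvMC := by
  have h : pvMarkers.all (fun q => q.2.all (fun c => !pvMC.contains c)) = true := by decide
  intro q hq c hc
  simp only [List.all_eq_true] at h
  simpa using h q hq c hc
set_option maxRecDepth 4096 in
lemma pvM_snd_ne_nil : ∀ q ∈ pvMarkers, q.2 ≠ [] := by decide
set_option maxRecDepth 4096 in
lemma pvM_no_pre : ∀ p ∈ pvMarkers, ∀ q ∈ pvMarkers, p.1 ≠ q.1 → ¬ q.1.isPrefixOf p.1 := by decide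
set_option maxRecDepth 4096 in
lemma pvM_keys_nodup : (pvMarkers.map Prod.fst).Nodup := by decide

lemma pvM_fst_ne_nil {q : List Char × List Char} (hq : q ∈ pvMarkers) : q.1 ≠ [] := by
  intro h; have := pvM_head q hq; rw [h] at this; simp at this

lemma pvM_fst_cons {q : List Char × List Char} (hq : q ∈ pvMarkers) :
    ∃ w, q.1 = '{' :: w := by
  have := pvM_head q hq
  cases hq1 : q.1 with
  | nil => rw [hq1] at this; simp at this
  | cons d w => rw [hq1] at this; simp at this; exact ⟨w, by rw [this]⟩

lemma pvM_snd_no_brace {q : List Char × List Char} (hq : q ∈ pvMarkers) : '{' ∉ q.2 := by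
  intro h; exact pvM_snd_not_mc q hq _ h (by decide)

-- structural-recursion form of Python's str.replace for a fixed nonempty pattern
def pvRep (old new : List Char) : List Char → List Char
  | [] => []
  | c :: t =>
    if old.isPrefixOf (c :: t) then new ++ pvRep old new (t.drop (old.length - 1))
    else c :: pvRep old new t
termination_by s => s.length
decreasing_by
  · simp only [List.length_drop, List.length_cons]
    omega
  · simp

lemma pvRep_nil (old new : List Char) : pvRep old new [] = [] := by rw [pvRep]

lemma pvRep_cons_pos {old : List Char} (new : List Char) {c : Char} {t : List Char}
    (h : old <+: (c :: t)) :
    pvRep old new (c :: t) = new ++ pvRep old new (t.drop (old.length - 1)) := by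
  rw [pvRep]; simp [List.isPrefixOf_iff_prefix.mpr h]

lemma pvRep_cons_neg {old : List Char} (new : List Char) {c : Char} {t : List Char}
    (h : ¬ old <+: (c :: t)) :
    pvRep old new (c :: t) = c :: pvRep old new t := by
  rw [pvRep]
  simp only [List.isPrefixOf_iff_prefix]
  rw [if_neg h]

lemma pvRep_marker_prefix {old : List Char} (new X : List Char) (h : old ≠ []) :
    pvRep old new (old ++ X) = new ++ pvRep old new X := by
  obtain ⟨c, w, rfl⟩ : ∃ c w, old = c :: w := by
    cases old with
    | nil => exact absurd rfl h
    | cons c w => exact ⟨c, w, rfl⟩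
  rw [List.cons_append, pvRep_cons_pos new (by simp [List.prefix_append])]
  simp

-- A's replace equals pvRep (nonempty pattern)
lemma pvGo_eq (old new : List Char) (hold : old ≠ []) :
    ∀ fuel (s acc : List Char), s.length ≤ fuel →
      PySem.Chars.replace.go old new fuel s acc = acc.reverse ++ pvRep old new s := by
  intro fuel
  induction fuel with
  | zero =>
    intro s acc h
    have : s = [] := by cases s <;> simp_all
    subst this
    rw [PySem.Chars.replace.go, pvRep_nil]
  | succ n ih =>
    intro s acc h
    cases s with
    | nil =>
      rw [PySem.Chars.replace.go, pvRep_nil, List.append_nil]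
      omega
    | cons c t =>
      by_cases hp : old <+: (c :: t)
      · rw [PySem.Chars.replace.go]
        simp only [List.isPrefixOf_iff_prefix, if_pos hp]
        obtain ⟨d, w, rfl⟩ : ∃ d w, old = d :: w := by
          cases old with
          | nil => exact absurd rfl hold
          | cons d w => exact ⟨d, w, rfl⟩
        simp only [List.length_cons, List.drop_succ_cons]
        rw [ih (t.drop w.length) (new.reverse ++ acc)
            (by simp only [List.length_drop]; simp at h; omega)]
        rw [pvRep_cons_pos new hp]
        simp
      · rw [PySem.Chars.replace.go]
        simp only [List.isPrefixOf_iff_prefix, if_neg hp]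
        rw [ih t (c :: acc) (by simp at h ⊢; omega), pvRep_cons_neg new hp]
        simp

lemma pvReplace_eq_pvRep (s old new : List Char) (hold : old ≠ []) :
    PySem.Chars.replace s old new = pvRep old new s := by
  rw [PySem.Chars.replace]
  rw [if_neg (by simp [hold])]
  simpa using pvGo_eq old new hold s.length s [] le_rfl

-- skipping a block no marker can match into
lemma pvRep_skip {q : List Char × List Char} (a X : List Char)
    (h : ∀ i, i < a.length → ¬ q.1 <+: (a.drop i ++ X)) :
    pvRep q.1 q.2 (a ++ X) = a ++ pvRep q.1 q.2 X := by
  induction a with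
  | nil => simp
  | cons c a' ih =>
    rw [List.cons_append, pvRep_cons_neg _ (by simpa using h 0 (by simp)),
        ih (fun i hi => by simpa using h (i+1) (by simpa using hi))]
    simp

lemma pvPrefix_head {w l : List Char} {c : Char} (h : (c :: w) <+: l) : l.head? = some c := by
  obtain ⟨r, rfl⟩ := h
  simp

lemma pvPrefix_getElem {q : List Char × List Char} (hq : q ∈ pvMarkers)
    {a X : List Char} {i : Nat} (hi : i < a.length)
    (hpre : q.1 <+: (a.drop i ++ X)) : a[i] = '{' := by
  obtain ⟨w, hw⟩ := pvM_fst_cons hq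
  rw [hw] at hpre
  have h2 := pvPrefix_head hpre
  rw [List.head?_append, List.head?_drop, List.getElem?_eq_getElem hi] at h2
  simpa using h2

-- a marker cannot match starting strictly inside another marker
lemma pvNo_match_inside_marker {p q : List Char × List Char}
    (hp : p ∈ pvMarkers) (hq : q ∈ pvMarkers) (hne : p.1 ≠ q.1) (X : List Char) :
    ∀ i, i < p.1.length → ¬ q.1 <+: (p.1.drop i ++ X) := by
  intro i hi hpre
  cases i with
  | zero =>
    simp only [List.drop_zero] at hpre
    by_cases hle : q.1.length ≤ p.1.length
    · have : q.1 <+: p.1 :=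
        List.prefix_of_prefix_length_le hpre (List.prefix_append p.1 X) (by simpa using hle)
      exact (pvM_no_pre p hp q hq hne) (List.isPrefixOf_iff_prefix.mpr this)
    · have : p.1 <+: q.1 :=
        List.prefix_of_prefix_length_le (List.prefix_append p.1 X) hpre (by omega)
      exact (pvM_no_pre q hq p hp (Ne.symm hne)) (List.isPrefixOf_iff_prefix.mpr this)
  | succ j =>
    have hget : p.1[j+1] = '{' := pvPrefix_getElem hq hi hpre
    have hmem : '{' ∈ p.1.tail := by
      obtain ⟨h0, t0, hp1⟩ : ∃ h0 t0, p.1 = h0 :: t0 := by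
        cases hp1 : p.1 with
        | nil => exact absurd hp1 (pvM_fst_ne_nil hp)
        | cons h0 t0 => exact ⟨h0, t0, rfl⟩
      have hj : j < t0.length := by
        have := hi; rw [hp1] at this; simpa using this
      have ht0 : t0[j] = '{' := by
        have h3 := hget
        simp only [hp1, List.getElem_cons_succ] at h3
        exact h3
      rw [hp1]
      simp only [List.tail_cons]
      exact ht0 ▸ List.getElem_mem hj
    exact pvM_tail_no_brace p hp hmem

-- a marker cannot match starting inside a brace-free block
lemma pvNo_match_inside_clean {q : List Char × List Char}
    (hq : q ∈ pvMarkers) {a : List Char} (ha : '{' ∉ a) (X : List Char) :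
    ∀ i, i < a.length → ¬ q.1 <+: (a.drop i ++ X) := by
  intro i hi hpre
  exact ha ((pvPrefix_getElem hq hi hpre) ▸ List.getElem_mem hi)

-- the fold over markers, on the character-list level
def pvFold (L : List (List Char × List Char)) (l : List Char) : List Char :=
  L.foldl (fun acc q => pvRep q.1 q.2 acc) l

lemma pvFold_nil_input : ∀ L, pvFold L [] = [] := by
  intro L
  induction L with
  | nil => rfl
  | cons q L ih =>
    simp only [pvFold, List.foldl_cons, pvRep_nil]
    exact ih

lemma pvFold_pass_marker {p : List Char × List Char} (hp : p ∈ pvMarkers)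
    (L : List (List Char × List Char))
    (hL : ∀ q ∈ L, q ∈ pvMarkers ∧ q.1 ≠ p.1) (X : List Char) :
    pvFold L (p.1 ++ X) = p.1 ++ pvFold L X := by
  induction L generalizing X with
  | nil => rfl
  | cons q L ih =>
    have hq := hL q (by simp)
    simp only [pvFold, List.foldl_cons]
    rw [pvRep_skip p.1 X (pvNo_match_inside_marker hp hq.1 (Ne.symm hq.2) X)]
    exact ih (fun r hr => hL r (by simp [hr])) _

lemma pvFold_pass_clean (L : List (List Char × List Char))
    (hL : ∀ q ∈ L, q ∈ pvMarkers) {a : List Char} (ha : '{' ∉ a) (X : List Char) :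
    pvFold L (a ++ X) = a ++ pvFold L X := by
  induction L generalizing X with
  | nil => rfl
  | cons q L ih =>
    simp only [pvFold, List.foldl_cons]
    rw [pvRep_skip a X (pvNo_match_inside_clean (hL q (by simp)) ha X)]
    exact ih (fun r hr => hL r (by simp [hr])) _

-- X is obtainable from t by replacing some marker occurrences
inductive PvRel : List Char → List Char → Prop
  | nil : PvRel [] []
  | cons (c : Char) {t X : List Char} : PvRel t X → PvRel (c :: t) (c :: X)
  | rep {m u t X : List Char} : (m, u) ∈ pvMarkers → PvRel t X → PvRel (m ++ t) (u ++ X)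

lemma pvRel_refl : ∀ t, PvRel t t := by
  intro t
  induction t with
  | nil => exact PvRel.nil
  | cons c t ih => exact PvRel.cons c ih

-- a marker-alphabet prefix of the replaced text is a prefix of the original text
lemma pvRel_prefix_transfer :
    ∀ (w : List Char), (∀ c ∈ w, c ∈ pvMC) →
      ∀ {t X : List Char}, PvRel t X → w <+: X →
        w <+: t ∧ PvRel (t.drop w.length) (X.drop w.length) := by
  intro w
  induction w with
  | nil => intro _ t X h _; exact ⟨List.nil_prefix, by simpa using h⟩
  | cons c w ih =>
    intro hmc t X hrel hpre
    cases hrel with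
    | nil => simp at hpre
    | cons d hrel' =>
      obtain ⟨rfl, hpre'⟩ : c = d ∧ w <+: _ := by
        rw [List.cons_prefix_cons] at hpre; exact hpre
      obtain ⟨h1, h2⟩ := ih (fun x hx => hmc x (by simp [hx])) hrel' hpre'
      exact ⟨List.cons_prefix_cons.mpr ⟨rfl, h1⟩, by simpa using h2⟩
    | @rep m u t' X' hm hrel' =>
      exfalso
      obtain ⟨u0, ur, rfl⟩ : ∃ u0 ur, u = u0 :: ur := by
        cases hu : u with
        | nil => exact absurd hu (pvM_snd_ne_nil (m, u) hm)
        | cons u0 ur => exact ⟨u0, ur, rfl⟩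
      have hc : c = u0 := by
        have := pvPrefix_head hpre
        simpa using this.symm
      exact pvM_snd_not_mc (m, u0 :: ur) hm u0 (by simp) (hc ▸ hmc c (by simp))

-- applying one marker replacement preserves the relation
lemma pvRel_rep {m u : List Char} (hmu : (m, u) ∈ pvMarkers) :
    ∀ n (X : List Char), X.length ≤ n → ∀ {t : List Char}, PvRel t X → PvRel t (pvRep m u X) := by
  intro n
  induction n with
  | zero =>
    intro X hX t hrel
    have : X = [] := by cases X <;> simp_all
    subst this
    rw [pvRep_nil]
    exact hrel
  | succ n ih =>
    intro X hX t hrel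
    cases hrel with
    | nil => rw [pvRep_nil]; exact PvRel.nil
    | @cons c t' X' hrel' =>
      by_cases hp : m <+: (c :: X')
      · obtain ⟨hpt, hrel2⟩ := pvRel_prefix_transfer m
          (fun x hx => pvM_fst_mc (m, u) hmu x hx) (PvRel.cons c hrel') hp
        obtain ⟨Xr, hXr⟩ := hp
        obtain ⟨tr, htr⟩ := hpt
        have hdX : (c :: X').drop m.length = Xr := by rw [← hXr]; simp
        have hdt : (c :: t').drop m.length = tr := by rw [← htr]; simp
        rw [hdX, hdt] at hrel2
        rw [← hXr, ← htr, pvRep_marker_prefix _ _ (pvM_fst_ne_nil hmu)]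
        refine PvRel.rep hmu (ih Xr ?_ hrel2)
        have hm1 : 0 < m.length := List.length_pos_of_ne_nil (pvM_fst_ne_nil hmu)
        have : m.length + Xr.length = X'.length + 1 := by
          have := congrArg List.length hXr; simpa using this
        simp at hX
        omega
      · rw [pvRep_cons_neg _ hp]
        exact PvRel.cons c (ih X' (by simp at hX; omega) hrel')
    | @rep m' u' t' X' hm' hrel' =>
      rw [pvRep_skip u' X' (pvNo_match_inside_clean hmu (pvM_snd_no_brace hm') X')]
      refine PvRel.rep hm' (ih X' ?_ hrel')
      have h1 : 0 < u'.length := List.length_pos_of_ne_nil (pvM_snd_ne_nil (m', u') hm')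
      simp at hX
      omega

lemma pvRel_rep' {m u : List Char} (hmu : (m, u) ∈ pvMarkers)
    {t X : List Char} (h : PvRel t X) : PvRel t (pvRep m u X) :=
  pvRel_rep hmu X.length X le_rfl h

-- folding past a position where no marker matches in the original text
lemma pvFold_cons_skip (L : List (List Char × List Char)) (hL : ∀ q ∈ L, q ∈ pvMarkers)
    {c : Char} {t : List Char} (hnp : ∀ q ∈ pvMarkers, ¬ q.1 <+: (c :: t)) :
    ∀ {X : List Char}, PvRel t X → pvFold L (c :: X) = c :: pvFold L X := by
  induction L with
  | nil => intro X _; rfl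
  | cons q L ih =>
    intro X hrel
    have hq : q ∈ pvMarkers := hL q (by simp)
    have hnpre : ¬ q.1 <+: (c :: X) := by
      intro hpre
      obtain ⟨w, hw⟩ := pvM_fst_cons hq
      rw [hw, List.cons_prefix_cons] at hpre
      obtain ⟨rfl, hwX⟩ := hpre
      have hwmc : ∀ x ∈ w, x ∈ pvMC := fun x hx =>
        pvM_fst_mc q hq x (by rw [hw]; simp [hx])
      obtain ⟨hwt, _⟩ := pvRel_prefix_transfer w hwmc hrel hwX
      exact hnp q hq (by rw [hw]; exact List.cons_prefix_cons.mpr ⟨rfl, hwt⟩)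
    simp only [pvFold, List.foldl_cons]
    rw [pvRep_cons_neg _ hnpre]
    exact ih (fun r hr => hL r (by simp [hr])) (pvRel_rep' (by simpa using hq) hrel)

-- main invariant: the fifteen-pass fold equals the prefix-driven scan
lemma pvFold_eq_pvScan_aux :
    ∀ n (cs : List Char), cs.length ≤ n → pvFold pvMarkers cs = pvScan cs := by
  intro n
  induction n with
  | zero =>
    intro cs h
    have : cs = [] := by cases cs <;> simp_all
    subst this
    rw [pvFold_nil_input, pvScan]
  | succ n ih =>
    intro cs h
    cases cs with
    | nil => rw [pvFold_nil_input, pvScan]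
    | cons c t =>
      cases hfind : pvMarkers.find? (fun p => p.1.isPrefixOf (c :: t)) with
      | none =>
        have hnp : ∀ q ∈ pvMarkers, ¬ q.1 <+: (c :: t) := by
          intro q hq hpre
          have := List.find?_eq_none.mp hfind q hq
          rw [List.isPrefixOf_iff_prefix] at this
          exact this hpre
        rw [pvFold_cons_skip pvMarkers (fun q hq => hq) hnp (pvRel_refl t),
            ih t (by simp at h; omega)]
        rw [pvScan, hfind]
      | some p =>
        have hp : p ∈ pvMarkers := List.mem_of_find?_eq_some hfind
        have hpre : p.1 <+: (c :: t) := by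
          have := List.find?_some hfind
          simpa [List.isPrefixOf_iff_prefix] using this
        obtain ⟨pre, post, hsplit⟩ := List.append_of_mem hp
        have hItems : ∀ q ∈ pre, q ∈ pvMarkers ∧ q.1 ≠ p.1 := by
          intro q hq
          refine ⟨by rw [hsplit]; simp [hq], ?_⟩
          have hnd := pvM_keys_nodup
          rw [hsplit] at hnd
          simp only [List.map_append, List.map_cons, List.nodup_append] at hnd
          intro heq
          exact hnd.2.2 q.1 (List.mem_map_of_mem hq) p.1 (by simp) heq
        have hpost : ∀ q ∈ post, q ∈ pvMarkers := by
          intro q hq; rw [hsplit]; simp [hq]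
        obtain ⟨r, hr⟩ := hpre
        obtain ⟨w, hw⟩ := pvM_fst_cons hp
        have hlenr : r.length ≤ n := by
          have := congrArg List.length hr
          rw [hw] at this
          simp at this h
          omega
        have key : pvFold pvMarkers (c :: t) = p.2 ++ pvFold pvMarkers r := by
          rw [← hr, hsplit]
          simp only [pvFold, List.foldl_append, List.foldl_cons]
          rw [show (pre.foldl (fun acc q => pvRep q.1 q.2 acc) (p.1 ++ r)) =
                pvFold pre (p.1 ++ r) from rfl,
              pvFold_pass_marker hp pre hItems r,
              pvRep_marker_prefix _ _ (pvM_fst_ne_nil hp)]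
          rw [show (post.foldl (fun acc q => pvRep q.1 q.2 acc)
                (p.2 ++ pvRep p.1 p.2 (pvFold pre r))) =
              pvFold post (p.2 ++ pvRep p.1 p.2 (pvFold pre r)) from rfl,
            pvFold_pass_clean post hpost (pvM_snd_no_brace hp) _]
          rfl
        rw [key, ih r hlenr, pvScan, hfind]
        have hrt : r = t.drop (p.1.length - 1) := by
          have h2 : '{' = c ∧ w ++ r = t := by
            rw [hw] at hr; simpa using hr
          rw [hw, ← h2.2]
          simp
        rw [hrt]

-- string-level bridge: the fold of Str.replace over marker pairs
lemma pvStrFold (L : List (String × String))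
    (hL : ∀ q ∈ L.map (fun p => (p.1.toList, p.2.toList)), q ∈ pvMarkers) (s : String) :
    L.foldl (fun t p => PySem.Str.replace t p.1 p.2) s =
      String.ofList (pvFold (L.map fun p => (p.1.toList, p.2.toList)) s.toList) := by
  induction L generalizing s with
  | nil => simp [pvFold, String.ofList_toList]
  | cons p L ih =>
    have hp : (p.1.toList, p.2.toList) ∈ pvMarkers := hL _ (by simp)
    simp only [List.foldl_cons, List.map_cons, pvFold]
    rw [ih (fun q hq => hL q (by simp at hq ⊢; tauto))]
    congr 2
    rw [show (PySem.Str.replace s p.1 p.2).toList =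
          PySem.Chars.replace s.toList p.1.toList p.2.toList by
        simp [PySem.Str.replace]]
    rw [pvReplace_eq_pvRep _ _ _ (pvM_fst_ne_nil hp)]

-- ===== bridge from the prefix-driven scan to B's brace-driven scan =====

-- the shape of A's markers in terms of B's content keys
def pvShape (p : String × String) : List Char × List Char :=
  ('{' :: (p.1.toList ++ ['}']), p.2.toList)

set_option maxRecDepth 4096 in
lemma pvMarkers_eq_map_shape : pvMarkers = pvContentPairs.map pvShape := by decide

set_option maxRecDepth 4096 in
lemma pvCP_no_rbrace : ∀ p ∈ pvContentPairs, '}' ∉ p.1.toList := by decide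

set_option maxRecDepth 4096 in
lemma pvDict_eq_mk : pvContentDict = PySem.Dict.mk pvContentPairs := by decide

lemma pvGet?_mk_eq_find (L : List (String × String)) (x : String) :
    (PySem.Dict.mk L).get? x = (L.find? (fun p => p.1 == x)).map (·.2) := by
  induction L with
  | nil => simp [PySem.Dict.get?]
  | cons p L ih =>
    obtain ⟨k, v⟩ := p
    rw [PySem.Dict.get?_mk_cons, List.find?_cons]
    by_cases h : (k == x) = true
    · simp [h]
    · simp only [h]
      simp only [Bool.false_eq_true, if_false] at *
      simpa using ih

lemma pvFind?_congr {α : Type} {p q : α → Bool} :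
    ∀ (l : List α), (∀ a ∈ l, p a = q a) → l.find? p = l.find? q := by
  intro l
  induction l with
  | nil => intro _; rfl
  | cons a l ih =>
    intro h
    rw [List.find?_cons, List.find?_cons, h a (by simp), ih (fun b hb => h b (by simp [hb]))]

-- two brace-terminated prefixes with brace-free bodies coincide exactly when the bodies do
lemma pvBrace_prefix {u : List Char} (hu : '}' ∉ u) :
    ∀ {v y : List Char}, '}' ∉ v → ((u ++ ['}']) <+: (v ++ '}' :: y) ↔ u = v) := by
  induction u with
  | nil =>
    intro v y hv
    cases v with
    | nil => simp
    | cons d v' =>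
      simp only [List.nil_append, List.cons_append, List.cons_prefix_cons]
      constructor
      · rintro ⟨rfl, -⟩; exact absurd (by simp) hv
      · intro h; simp at h
  | cons a u' ih =>
    intro v y hv
    cases v with
    | nil =>
      simp only [List.nil_append, List.cons_append, List.cons_prefix_cons]
      constructor
      · rintro ⟨rfl, -⟩; exact absurd (by simp) hu
      · intro h; simp at h
    | cons d v' =>
      simp only [List.cons_append, List.cons_prefix_cons]
      rw [ih (fun h => hu (by simp [h])) (fun h => hv (by simp [h]))]
      constructor
      · rintro ⟨rfl, rfl⟩; rfl
      · intro h
        injection h with h1 h2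
        exact ⟨h1, h2⟩

-- at '{' :: (k ++ '}' :: r) with brace-free k, A's marker search is B's dict lookup
lemma pvFind_eq_lookup {k r : List Char} (hk : '}' ∉ k) :
    pvMarkers.find? (fun p => p.1.isPrefixOf ('{' :: (k ++ '}' :: r))) =
      (pvContentPairs.find? (fun p => p.1 == String.ofList k)).map pvShape := by
  rw [pvMarkers_eq_map_shape, List.find?_map]
  congr 1
  apply pvFind?_congr
  intro p hp
  have hiff : ((p.1.toList ++ ['}']) <+: (k ++ '}' :: r)) ↔ p.1 = String.ofList k := by
    rw [pvBrace_prefix (pvCP_no_rbrace p hp) hk]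
    constructor
    · intro h2; exact String.toList_inj.mp (by rw [h2, String.toList_ofList])
    · intro h2; rw [h2]; exact String.toList_ofList
  rw [Bool.eq_iff_iff]
  simp only [Function.comp, pvShape, List.isPrefixOf_iff_prefix, List.cons_prefix_cons,
    true_and, beq_iff_eq]
  exact hiff

-- decomposing the tail at the first '}' that Chars.find reports
lemma pvFind_rbrace_split {t : List Char} {j : Int}
    (hj : PySem.Chars.find t ['}'] = j) (hne : j ≠ -1) :
    '}' ∉ t.take j.toNat ∧ t = t.take j.toNat ++ '}' :: t.drop (j.toNat + 1) := by
  have h0 : 0 ≤ PySem.Chars.find t ['}'] := by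
    rcases (PySem.Chars.neg_one_le_find t ['}']).lt_or_eq with h | h
    · omega
    · exact absurd (hj ▸ h.symm) hne
  obtain ⟨hpre, hfirst⟩ := PySem.Chars.find_spec h0
  rw [hj] at hpre hfirst
  have hlt : j.toNat < t.length := by
    by_contra hge
    rw [List.drop_eq_nil_of_le (by omega)] at hpre
    simp at hpre
  have hget : t[j.toNat] = '}' := by
    have := pvPrefix_head hpre
    rw [List.head?_drop, List.getElem?_eq_getElem hlt] at this
    simpa using this
  constructor
  · intro hmem
    obtain ⟨i, hi, hti⟩ := List.mem_iff_getElem.mp hmem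
    rw [List.length_take] at hi
    have hi' : i < j.toNat := lt_of_lt_of_le hi (min_le_left _ _)
    have hilen : i < t.length := lt_of_lt_of_le hi (min_le_right _ _)
    refine hfirst i hi' ?_
    have hti' : t[i] = '}' := by
      rw [List.getElem_take] at hti
      exact hti
    refine ⟨t.drop (i + 1), ?_⟩
    rw [← hti']
    simp [List.getElem_cons_drop hilen]
  · conv_lhs => rw [← List.take_append_drop j.toNat t]
    congr 1
    rw [← hget]
    exact (List.getElem_cons_drop hlt).symm

-- no marker matches when the tail after '{' has no '}'
lemma pvNoBrace_no_marker {t : List Char} (ht : '}' ∉ t) :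
    pvMarkers.find? (fun p => p.1.isPrefixOf ('{' :: t)) = none := by
  rw [List.find?_eq_none]
  intro q hq
  rw [pvMarkers_eq_map_shape] at hq
  obtain ⟨p, hp, rfl⟩ := List.mem_map.mp hq
  simp only [pvShape, List.isPrefixOf_iff_prefix, List.cons_prefix_cons, true_and]
  intro hpre
  obtain ⟨rr, hr⟩ := hpre
  exact ht (by rw [← hr]; simp)

-- no marker matches at a character other than '{'
lemma pvNotLBrace_no_marker {c : Char} (hc : c ≠ '{') (t : List Char) :
    pvMarkers.find? (fun p => p.1.isPrefixOf (c :: t)) = none := by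
  rw [List.find?_eq_none]
  intro q hq
  rw [pvMarkers_eq_map_shape] at hq
  obtain ⟨p, hp, rfl⟩ := List.mem_map.mp hq
  simp only [pvShape, List.isPrefixOf_iff_prefix, List.cons_prefix_cons]
  intro hpre
  exact hc hpre.1.symm

-- the prefix-driven scan equals B's brace-driven scan
lemma pvScan_eq_pvScanB : ∀ n (cs : List Char), cs.length ≤ n → pvScan cs = pvScanB cs := by
  intro n
  induction n with
  | zero =>
    intro cs h
    have : cs = [] := by cases cs <;> simp_all
    subst this
    rw [pvScan, pvScanB]
  | succ n ih =>
    intro cs h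
    cases cs with
    | nil => rw [pvScan, pvScanB]
    | cons c t =>
      by_cases hc : c = '{'
      · subst hc
        cases hj : PySem.Chars.find t ['}'] == -1 with
        | true =>
          have hj' : PySem.Chars.find t ['}'] = -1 := by simpa using hj
          have ht : '}' ∉ t := by
            intro hmem
            have : ['}'] <:+: t := (List.singleton_infix_iff '}' t).mpr hmem
            exact ((PySem.Chars.find_eq_neg_one_iff t ['}']).mp hj') this
          rw [pvScan, pvNoBrace_no_marker ht, pvScanB]
          rw [ih t (by simp at h; omega)]
          simp [hj']
        | false =>
          have hne : PySem.Chars.find t ['}'] ≠ -1 := by simpa using hj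
          obtain ⟨hk, hsplit⟩ := pvFind_rbrace_split rfl hne
          set jn := (PySem.Chars.find t ['}']).toNat with hjn
          have hk' := hk
          rw [pvScan]
          conv_lhs => rw [hsplit]
          rw [pvFind_eq_lookup hk']
          rw [pvScanB]
          rw [if_neg hne, pvDict_eq_mk, pvGet?_mk_eq_find]
          cases hfind : pvContentPairs.find? (fun p => p.1 == String.ofList (t.take jn)) with
          | none =>
            simp only [Option.map_none]
            rw [← hsplit, ih t (by simp at h; omega)]
            simp
          | some p =>
            simp only [Option.map_some]
            have hkey : p.1.toList = t.take jn := by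
              have := List.find?_some hfind
              have h2 : p.1 = String.ofList (t.take jn) := by simpa using this
              rw [h2]; exact String.toList_ofList
            have hjle : jn ≤ t.length := by
              have h0 := PySem.Chars.find_le_length t ['}']
              omega
            have hklen : (List.take jn t).length = jn := by
              rw [List.length_take]; omega
            have hlen : (pvShape p).1.length - 1 = jn + 1 := by
              simp only [pvShape, List.length_cons, List.length_append, List.length_nil, hkey, hklen]
              omega
            have hdrop : (t.take jn ++ '}' :: t.drop (jn + 1)).drop ((pvShape p).1.length - 1) = t.drop (jn + 1) := by
              rw [hlen, List.drop_append, hklen,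
                  List.drop_eq_nil_of_le (by rw [hklen]; omega)]
              have h1 : jn + 1 - jn = 1 := by omega
              rw [h1]
              simp
            rw [hdrop]
            have hrlen : (t.drop (jn + 1)).length ≤ n := by
              simp only [List.length_drop] at *
              simp at h
              omega
            rw [ih _ hrlen]
            rfl
      · rw [pvScan, pvNotLBrace_no_marker hc t, pvScanB, if_neg hc]
        rw [ih t (by simp at h; omega)]

-- ===== VERDICT (by name: the statement is the Claim_ definition above) =====
theorem convert_to_display_format_spec : Claim_equal_convert_to_display_format := by
  unfold Claim_equal_convert_to_display_format Spec_convert_to_display_format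
  intro text tf _
  unfold convert_to_display_format convert_to_display_format_alt
  by_cases h : tf == "unicode"
  · rw [if_pos h, if_pos h]
    rw [pvStrFold pvUnicodeMap (fun q hq => hq) text]
    rw [show (pvUnicodeMap.map fun p => (p.1.toList, p.2.toList)) = pvMarkers from rfl]
    rw [pvFold_eq_pvScan_aux text.toList.length text.toList le_rfl]
    rw [pvScan_eq_pvScanB text.toList.length text.toList le_rfl]
  · rw [if_neg h, if_neg h]
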